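-- pv_equiv track=rewrite | github.com/EngineerMinded/EverybodyCodes | 2025/Quest14/Quest14.py | find_repetitive_patterns
-- ===== SOURCE A (Python) =====
-- def find_repetitive_patterns(diffs, current_iteration):
--     n = 0
--     length = len(diffs)
--     for i in range(1, length // 2 + 1):
--         is_pattern = True
--         for j in range(length - i):
--             if diffs[j] != diffs[j + i]:
--                 is_pattern = False
--                 break
--         if is_pattern:
--             n = i
--             break
--
--     return (n, diffs,current_iteration)
-- ===== SOURCE B (Python) =====
-- def find_repetitive_patterns(diffs, current_iteration):
--     # KMP prefix (failure) function: the smallest period of the list is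
--     # n - (longest proper border); it is the answer iff it is at most n // 2,
--     # otherwise there is no repetition and the answer is 0.
--     n = len(diffs)
--     pi = [0] * n
--     k = 0
--     for i in range(1, n):
--         while k > 0 and diffs[i] != diffs[k]:
--             k = pi[k - 1]
--         if diffs[i] == diffs[k]:
--             k += 1
--         pi[i] = k
--     p = n - (pi[n - 1] if n > 0 else 0)
--     return (p if p <= n // 2 else 0, diffs, current_iteration)
-- ===== Notes on version B (the rewrite author's own statement) =====
-- stated objective: alternative
-- what changed: B computes the KMP prefix (failure) function in one linear pass and returns n minus the longest proper border (capped at n//2, else 0), replacing A's nested scan over every candidate period; worst-case O(n) vs O(n^2), though random inputs let A break early so a timing run did not confirm a speed-up.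
import Mathlib
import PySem

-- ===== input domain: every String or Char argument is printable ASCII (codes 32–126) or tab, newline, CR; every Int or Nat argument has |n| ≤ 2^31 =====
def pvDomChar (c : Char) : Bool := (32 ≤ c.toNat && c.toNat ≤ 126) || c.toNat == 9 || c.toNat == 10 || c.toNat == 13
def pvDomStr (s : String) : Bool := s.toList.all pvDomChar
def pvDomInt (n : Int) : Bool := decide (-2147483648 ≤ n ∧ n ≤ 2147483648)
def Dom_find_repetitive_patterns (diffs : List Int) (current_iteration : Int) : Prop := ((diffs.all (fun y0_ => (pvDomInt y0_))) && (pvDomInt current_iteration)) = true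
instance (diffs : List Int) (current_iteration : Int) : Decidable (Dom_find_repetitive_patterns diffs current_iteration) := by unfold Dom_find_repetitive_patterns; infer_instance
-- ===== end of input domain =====

-- B replaces A's nested scan over candidate periods by a single KMP
-- prefix-function pass: smallest period = n - longest proper border,
-- valid iff at most n // 2, else 0.

-- ===== PORT A =====
-- Inner 'for j … break on mismatch' loop: is_pattern is True iff every j agrees;
-- indices j and j+i are always in range (j < length - i), so getD is exact.
def pvInnerA (diffs : List Int) (i : Nat) : Bool :=
  (List.range (diffs.length - i)).all (fun j => diffs.getD j 0 == diffs.getD (j + i) 0)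

-- Outer 'for i in range(1, length//2 + 1)' with break on the first pattern, else n = 0.
def pvSearchA (diffs : List Int) : List Nat → Nat
  | [] => 0
  | i :: is => if pvInnerA diffs i then i else pvSearchA diffs is

def find_repetitive_patterns (diffs : List Int) (current_iteration : Int) : Int × List Int × Int :=
  ((pvSearchA diffs (List.range' 1 (diffs.length / 2)) : Nat), diffs, current_iteration)

-- ===== PORT B =====
-- 'while k > 0 and diffs[i] != diffs[k]: k = pi[k-1]'. fuel = k suffices since
-- pi[k-1] ≤ k-1 always; all indices are in range, so getD is exact.
def pvFall (d : List Int) (pi : List Nat) (x : Int) : Nat → Nat → Nat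
  | 0, k => k
  | fuel+1, k =>
      if 0 < k && !(x == d.getD k 0) then pvFall d pi x fuel (pi.getD (k-1) 0) else k

-- 'for i in range(1, n): … pi[i] = k' carrying (pi, k).
def pvKmpLoop (d : List Int) : List Nat → List Nat × Nat → List Nat × Nat
  | [], s => s
  | i :: rest, s =>
      let x := d.getD i 0
      let k1 := pvFall d s.1 x s.2 s.2
      let k2 := if x == d.getD k1 0 then k1 + 1 else k1
      pvKmpLoop d rest (s.1.set i k2, k2)

def find_repetitive_patterns_alt (diffs : List Int) (current_iteration : Int) : Int × List Int × Int :=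
  let n := diffs.length
  let s := pvKmpLoop diffs (List.range' 1 (n - 1)) (List.replicate n 0, 0)
  let b := if 0 < n then s.1.getD (n - 1) 0 else 0
  let p := n - b
  ((if p ≤ n / 2 then (p : Int) else 0), diffs, current_iteration)

-- ===== PRECONDITION & SPEC =====
def Spec_find_repetitive_patterns (diffs : List Int) (current_iteration : Int) (out : Int × List Int × Int) : Prop := out = find_repetitive_patterns_alt diffs current_iteration
instance (diffs : List Int) (current_iteration : Int) (out : Int × List Int × Int) : Decidable (Spec_find_repetitive_patterns diffs current_iteration out) := by unfold Spec_find_repetitive_patterns; infer_instance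

-- ===== CLAIM (what is proved, stated in full; the proofs are below) =====
def Claim_equal_find_repetitive_patterns : Prop := ∀ (diffs : List Int) (current_iteration : Int), Dom_find_repetitive_patterns diffs current_iteration → Spec_find_repetitive_patterns diffs current_iteration (find_repetitive_patterns diffs current_iteration)

-- ===== LEMMAS AND PROOFS =====

-- k is a (proper) border of the prefix of length m of d.
def pvBrd (d : List Int) (m k : Nat) : Prop :=
  k < m ∧ ∀ j, j < k → d.getD j 0 = d.getD (j + (m - k)) 0

-- k is the longest proper border of the prefix of length m.
def pvMaxB (d : List Int) (m k : Nat) : Prop :=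
  pvBrd d m k ∧ ∀ k', pvBrd d m k' → k' ≤ k

theorem pvBrd_zero (d : List Int) (m : Nat) (hm : 0 < m) : pvBrd d m 0 :=
  ⟨hm, fun j hj => absurd hj (Nat.not_lt_zero j)⟩

-- a border of a border is a border
theorem pvBrd_trans (d : List Int) (m b j : Nat)
    (hb : pvBrd d m b) (hj : pvBrd d b j) : pvBrd d m j := by
  obtain ⟨hb1, hb2⟩ := hb
  obtain ⟨hj1, hj2⟩ := hj
  refine ⟨by omega, fun x hx => ?_⟩
  have h1 : d.getD x 0 = d.getD (x + (b - j)) 0 := hj2 x hx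
  have h2 : d.getD (x + (b - j)) 0 = d.getD (x + (b - j) + (m - b)) 0 :=
    hb2 (x + (b - j)) (by omega)
  have h3 : x + (b - j) + (m - b) = x + (m - j) := by omega
  rw [h1, h2, h3]

-- a shorter border of m is a border of a longer border of m
theorem pvBrd_of_lt (d : List Int) (m b j : Nat)
    (hb : pvBrd d m b) (hj : pvBrd d m j) (hlt : j < b) : pvBrd d b j := by
  obtain ⟨hb1, hb2⟩ := hb
  obtain ⟨hj1, hj2⟩ := hj
  refine ⟨hlt, fun x hx => ?_⟩
  have h1 : d.getD x 0 = d.getD (x + (m - j)) 0 := hj2 x hx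
  have h2 : d.getD (x + (b - j)) 0 = d.getD (x + (b - j) + (m - b)) 0 :=
    hb2 (x + (b - j)) (by omega)
  have h3 : x + (b - j) + (m - b) = x + (m - j) := by omega
  rw [h2, h3, ← h1]

-- extension of a border by one matching character
theorem pvBrd_succ (d : List Int) (m k : Nat) :
    pvBrd d (m+1) (k+1) ↔ pvBrd d m k ∧ d.getD k 0 = d.getD m 0 := by
  constructor
  · rintro ⟨h1, h2⟩
    have hk : k < m := by omega
    refine ⟨⟨hk, fun j hj => ?_⟩, ?_⟩
    · have := h2 j (by omega)
      have he : m + 1 - (k + 1) = m - k := by omega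
      rwa [he] at this
    · have := h2 k (by omega)
      have he : k + (m + 1 - (k + 1)) = m := by omega
      rwa [he] at this
  · rintro ⟨⟨h1, h2⟩, h3⟩
    refine ⟨by omega, fun j hj => ?_⟩
    have he : m + 1 - (k + 1) = m - k := by omega
    rw [he]
    rcases Nat.lt_or_ge j k with h | h
    · exact h2 j h
    · have hjk : j = k := by omega
      subst hjk
      have he2 : j + (m - j) = m := by omega
      rw [he2]; exact h3

-- the while-loop: from the current longest-border candidate k, pvFall finds the
-- longest border r of the prefix of length m that is followed by x (or 0).
theorem pvFall_spec (d : List Int) (pi : List Nat) (x : Int) (m : Nat)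
    (H : ∀ t, t < m → pvMaxB d (t+1) (pi.getD t 0)) :
    ∀ fuel k, k ≤ fuel → pvBrd d m k →
      (∀ k', pvBrd d m k' → d.getD k' 0 = x → k' ≤ k) →
      pvBrd d m (pvFall d pi x fuel k) ∧
      (d.getD (pvFall d pi x fuel k) 0 = x ∨ pvFall d pi x fuel k = 0) ∧
      (∀ k', pvBrd d m k' → d.getD k' 0 = x → k' ≤ pvFall d pi x fuel k) := by
  intro fuel
  induction fuel with
  | zero =>
    intro k hk hb hub
    have : k = 0 := by omega
    subst this
    exact ⟨hb, Or.inr rfl, hub⟩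
  | succ f ih =>
    intro k hk hb hub
    by_cases hc : (0 < k && !(x == d.getD k 0)) = true
    · simp only [pvFall, hc, if_true]
      have hc' := hc
      simp only [Bool.and_eq_true, decide_eq_true_eq, Bool.not_eq_true',
        beq_eq_false_iff_ne] at hc'
      obtain ⟨hkpos, hne⟩ := hc'
      have hkm : k < m := hb.1
      have hmax : pvMaxB d k (pi.getD (k-1) 0) := by
        have := H (k-1) (by omega)
        have he : k - 1 + 1 = k := by omega
        rwa [he] at this
      set k2 := pi.getD (k-1) 0 with hk2
      have hbk2 : pvBrd d m k2 := pvBrd_trans d m k k2 hb hmax.1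
      have hk2lt : k2 < k := hmax.1.1
      have hub2 : ∀ k', pvBrd d m k' → d.getD k' 0 = x → k' ≤ k2 := by
        intro k' hbk' hx
        have hle : k' ≤ k := hub k' hbk' hx
        have hne' : k' ≠ k := by
          intro he; subst he; exact hne hx.symm
        have : k' < k := by omega
        exact hmax.2 k' (pvBrd_of_lt d m k k' hb hbk' this)
      exact ih k2 (by omega) hbk2 hub2
    · simp only [pvFall, hc]
      refine ⟨hb, ?_, hub⟩
      rcases Nat.eq_zero_or_pos k with h0 | hpos
      · exact Or.inr h0
      · left
        have : (x == d.getD k 0) = true := by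
          by_contra h
          apply hc
          simp only [Bool.and_eq_true, decide_eq_true_eq]
          exact ⟨by simpa using hpos, by simpa using h⟩
        exact (beq_iff_eq.mp this).symm

-- one iteration of the for loop produces the longest border of the next prefix
theorem pvStep_maxB (d : List Int) (pi : List Nat) (i k : Nat)
    (H : ∀ t, t < i → pvMaxB d (t+1) (pi.getD t 0))
    (hk : pvMaxB d i k) :
    pvMaxB d (i+1)
      (if (d.getD i 0 == d.getD (pvFall d pi (d.getD i 0) k k) 0) = true
        then pvFall d pi (d.getD i 0) k k + 1 else pvFall d pi (d.getD i 0) k k) := by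
  set x := d.getD i 0 with hx
  obtain ⟨hr1, hr2, hr3⟩ :=
    pvFall_spec d pi x i H k k le_rfl hk.1 (fun k' hb _ => hk.2 k' hb)
  set r := pvFall d pi x k k with hr
  by_cases hm : (x == d.getD r 0) = true
  · simp only [hm, if_true]
    have hxr : d.getD r 0 = x := (beq_iff_eq.mp hm).symm
    constructor
    · exact (pvBrd_succ d i r).mpr ⟨hr1, hxr⟩
    · intro k' hbk'
      match k' with
      | 0 => omega
      | j+1 =>
        obtain ⟨hbj, hje⟩ := (pvBrd_succ d i j).mp hbk'
        have := hr3 j hbj hje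
        omega
  · simp only [hm]
    have hxr : ¬ d.getD r 0 = x := fun h => hm (beq_iff_eq.mpr h.symm)
    have hr0 : r = 0 := by rcases hr2 with h | h; exact absurd h hxr; exact h
    constructor
    · rw [hr0]; exact pvBrd_zero d (i+1) (by omega)
    · intro k' hbk'
      match k' with
      | 0 => omega
      | j+1 =>
        obtain ⟨hbj, hje⟩ := (pvBrd_succ d i j).mp hbk'
        have hj : j ≤ r := hr3 j hbj hje
        rw [hr0] at hj
        have : j = 0 := by omega
        subst this
        rw [hr0] at hxr
        exact absurd hje hxr

-- invariant of the whole for loop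
theorem pvKmpLoop_inv (d : List Int) :
    ∀ cnt i pi k, 1 ≤ i → i + cnt = d.length → pi.length = d.length →
      pvMaxB d i k → (∀ t, t < i → pvMaxB d (t+1) (pi.getD t 0)) →
      (pvKmpLoop d (List.range' i cnt) (pi, k)).1.length = d.length ∧
      pvMaxB d d.length (pvKmpLoop d (List.range' i cnt) (pi, k)).2 ∧
      (∀ t, t < d.length →
        pvMaxB d (t+1) ((pvKmpLoop d (List.range' i cnt) (pi, k)).1.getD t 0)) := by
  intro cnt
  induction cnt with
  | zero =>
    intro i pi k h1 h2 h3 h4 h5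
    simp only [List.range'_zero, pvKmpLoop]
    have hi : i = d.length := by omega
    subst hi
    exact ⟨h3, h4, fun t ht => h5 t ht⟩
  | succ c ih =>
    intro i pi k h1 h2 h3 h4 h5
    rw [List.range'_succ]
    simp only [pvKmpLoop]
    set x := d.getD i 0 with hx
    set r := pvFall d pi x k k with hr
    set k2 := if (x == d.getD r 0) = true then r + 1 else r with hk2
    have hstep : pvMaxB d (i+1) k2 := pvStep_maxB d pi i k h5 h4
    have hilen : i < pi.length := by omega
    have hset_len : (pi.set i k2).length = d.length := by
      rw [List.length_set]; exact h3
    have hget_set : ∀ t, t < i + 1 → (pi.set i k2).getD t 0 = (if t = i then k2 else pi.getD t 0) := by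
      intro t ht
      by_cases hti : t = i
      · subst hti
        simp [List.getD, hilen]
      · simp [List.getD, List.getElem?_set_ne (by omega : i ≠ t), hti]
    have h5' : ∀ t, t < i + 1 → pvMaxB d (t+1) ((pi.set i k2).getD t 0) := by
      intro t ht
      rw [hget_set t ht]
      by_cases hti : t = i
      · subst hti; simpa using hstep
      · rw [if_neg hti]; exact h5 t (by omega)
    exact ih (i+1) (pi.set i k2) k2 (by omega) (by omega) hset_len hstep h5'

-- generic find? on range': first element satisfying P
theorem pvFind_range'_some (P : Nat → Bool) (t : Nat) :
    ∀ len s, s ≤ t → t < s + len → P t = true →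
      (∀ i, s ≤ i → i < t → P i = false) →
      (List.range' s len).find? P = some t := by
  intro len
  induction len with
  | zero => intro s h1 h2; omega
  | succ c ih =>
    intro s h1 h2 h3 h4
    rw [List.range'_succ]
    by_cases hst : s = t
    · subst hst; simp [List.find?, h3]
    · have : P s = false := h4 s le_rfl (by omega)
      simp only [List.find?, this]
      exact ih (s+1) (by omega) (by omega) h3 (fun i hi1 hi2 => h4 i (by omega) hi2)

theorem pvFind_range'_none (P : Nat → Bool) :
    ∀ len s, (∀ i, s ≤ i → i < s + len → P i = false) →
      (List.range' s len).find? P = none := by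
  intro len
  induction len with
  | zero => intro s _; simp
  | succ c ih =>
    intro s h
    rw [List.range'_succ]
    simp only [List.find?, h s le_rfl (by omega)]
    exact ih (s+1) (fun i h1 h2 => h i (by omega) (by omega))

-- A's search is "first element of the list satisfying pvInnerA, else 0".
theorem pvSearchA_eq_find? (diffs : List Int) (l : List Nat) :
    pvSearchA diffs l = (match l.find? (pvInnerA diffs) with
      | some i => i
      | none => 0) := by
  induction l with
  | nil => rfl
  | cons i is ih =>
    by_cases h : pvInnerA diffs i
    · simp [pvSearchA, List.find?, h]
    · simp [pvSearchA, List.find?, h, ih]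

-- A's inner check for candidate period i is the border property for n - i.
theorem pvInnerA_iff_brd (d : List Int) (i : Nat) (h1 : 1 ≤ i) (h2 : i ≤ d.length) :
    pvInnerA d i = true ↔ pvBrd d d.length (d.length - i) := by
  unfold pvInnerA pvBrd
  rw [List.all_eq_true]
  constructor
  · intro h
    refine ⟨by omega, fun j hj => ?_⟩
    have := h j (List.mem_range.mpr hj)
    have he : d.length - (d.length - i) = i := by omega
    rw [he]
    exact beq_iff_eq.mp (by simpa using this)
  · rintro ⟨_, h⟩
    intro j hj
    have hj' : j < d.length - i := List.mem_range.mp hj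
    have := h j hj'
    have he : d.length - (d.length - i) = i := by omega
    rw [he] at this
    simpa using beq_iff_eq.mpr this

theorem pv_main_eq (diffs : List Int) (current_iteration : Int) :
    find_repetitive_patterns diffs current_iteration =
      find_repetitive_patterns_alt diffs current_iteration := by
  rcases Nat.eq_zero_or_pos diffs.length with h0 | hpos
  · -- empty list: both return (0, diffs, ci)
    unfold find_repetitive_patterns find_repetitive_patterns_alt
    simp [h0, pvSearchA]
  · -- n ≥ 1: run the loop invariant
    have hinv := pvKmpLoop_inv diffs (diffs.length - 1) 1 (List.replicate diffs.length 0) 0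
      le_rfl (by omega) (by simp)
      ⟨pvBrd_zero diffs 1 Nat.one_pos, fun k' hk' => by
        have := hk'.1; omega⟩
      (fun t ht => by
        have ht0 : t = 0 := by omega
        subst ht0
        simp only [List.getD, List.getElem?_replicate]
        have : (0 : Nat) < diffs.length := hpos
        simp only [if_pos this, Option.getD_some]
        exact ⟨pvBrd_zero diffs 1 Nat.one_pos, fun k' hk' => by have := hk'.1; omega⟩)
    obtain ⟨hlen, hkmax, hpimax⟩ := hinv
    set st := pvKmpLoop diffs (List.range' 1 (diffs.length - 1))
      (List.replicate diffs.length 0, 0) with hst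
    -- the longest border of the whole list, read off pi[n-1]
    have hlast : pvMaxB diffs diffs.length (st.1.getD (diffs.length - 1) 0) := by
      have := hpimax (diffs.length - 1) (by omega)
      have he : diffs.length - 1 + 1 = diffs.length := by omega
      rwa [he] at this
    set b := st.1.getD (diffs.length - 1) 0 with hb
    have hbn : b < diffs.length := hlast.1.1
    set n := diffs.length with hn
    set p := n - b with hp
    have hp1 : 1 ≤ p := by omega
    have hppos : p ≤ n := by omega
    -- A's search equals (if p ≤ n/2 then p else 0)
    have hA : pvSearchA diffs (List.range' 1 (n / 2)) = (if p ≤ n / 2 then p else 0) := by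
      rw [pvSearchA_eq_find?]
      have hfalse : ∀ i, 1 ≤ i → i < p → pvInnerA diffs i = false := by
        intro i hi1 hi2
        by_contra hc
        have htrue : pvInnerA diffs i = true := by
          cases h : pvInnerA diffs i
          · exact absurd h hc
          · rfl
        have hbrd : pvBrd diffs n (n - i) := (pvInnerA_iff_brd diffs i hi1 (by omega)).mp htrue
        have := hlast.2 (n - i) hbrd
        omega
      by_cases hle : p ≤ n / 2
      · have hfind : (List.range' 1 (n / 2)).find? (pvInnerA diffs) = some p := by
          apply pvFind_range'_some (pvInnerA diffs) p (n/2) 1 hp1 (by omega)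
          · exact (pvInnerA_iff_brd diffs p hp1 hppos).mpr (by
              have he : n - p = b := by omega
              rw [he]; exact hlast.1)
          · exact fun i hi1 hi2 => hfalse i hi1 hi2
        rw [hfind, if_pos hle]
      · have hfind : (List.range' 1 (n / 2)).find? (pvInnerA diffs) = none := by
          apply pvFind_range'_none (pvInnerA diffs) (n/2) 1
          intro i hi1 hi2
          exact hfalse i hi1 (by omega)
        rw [hfind, if_neg hle]
    unfold find_repetitive_patterns find_repetitive_patterns_alt
    simp only [← hn, ← hst, if_pos hpos, ← hb, ← hp, hA]
    by_cases hle : p ≤ n / 2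
    · simp [hle]
    · simp [hle]

-- ===== VERDICT (by name: the statement is the Claim_ definition above) =====
theorem find_repetitive_patterns_spec : Claim_equal_find_repetitive_patterns := by
  intro diffs current_iteration _
  unfold Spec_find_repetitive_patterns
  exact pv_main_eq diffs current_iteration
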